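-- pv_equiv track=rewrite | github.com/rimelq/VISTAF-RoboSkin-Vision-Integrated-Multimodal-Sensor | Code/phase_to_height.py | choose_carrier_peak
-- ===== SOURCE A (Python) =====
-- FORCE_RIGHT_HALF_PLANE = True
--
-- PREFER_PEAK_NEAR_CENTER_ROW = True
--
-- PEAK_MAX_DY_FROM_CENTER = 0.12
--
-- def choose_carrier_peak(peaks, h, w):
--     cy, cx = h // 2, w // 2
--     candidates = peaks[:]
--
--     if FORCE_RIGHT_HALF_PLANE:
--         c2 = [p for p in candidates if p[0] > cx]
--         if len(c2) > 0:
--             candidates = c2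
--
--     if PREFER_PEAK_NEAR_CENTER_ROW:
--         max_dy = int(PEAK_MAX_DY_FROM_CENTER * h)
--         c2 = [p for p in candidates if abs(p[1] - cy) <= max_dy]
--         if len(c2) > 0:
--             candidates = c2
--
--     if len(candidates) == 0:
--         candidates = peaks
--
--     carrier = max(candidates, key=lambda t: t[2])
--     return carrier[0], carrier[1]
-- ===== SOURCE B (Python) =====
-- PEAK_MAX_DY_FROM_CENTER = 0.12
--
--
-- def choose_carrier_peak(peaks, h, w):
--     cy, cx = h // 2, w // 2
--     max_dy = int(PEAK_MAX_DY_FROM_CENTER * h)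
--     rank = lambda p: 2 * (p[0] > cx) + (abs(p[1] - cy) <= max_dy)
--     best = max(peaks, key=lambda p: (rank(p), p[2]))
--     return best[0], best[1]
-- ===== Notes on version B (the rewrite author's own statement) =====
-- stated objective: simpler
-- what changed: The two tiered narrowing filters plus empty-fallback are replaced by a single max over all peaks keyed lexicographically by (rank, amplitude), where rank = 2*(in right half) + (near center row).
import Mathlib
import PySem

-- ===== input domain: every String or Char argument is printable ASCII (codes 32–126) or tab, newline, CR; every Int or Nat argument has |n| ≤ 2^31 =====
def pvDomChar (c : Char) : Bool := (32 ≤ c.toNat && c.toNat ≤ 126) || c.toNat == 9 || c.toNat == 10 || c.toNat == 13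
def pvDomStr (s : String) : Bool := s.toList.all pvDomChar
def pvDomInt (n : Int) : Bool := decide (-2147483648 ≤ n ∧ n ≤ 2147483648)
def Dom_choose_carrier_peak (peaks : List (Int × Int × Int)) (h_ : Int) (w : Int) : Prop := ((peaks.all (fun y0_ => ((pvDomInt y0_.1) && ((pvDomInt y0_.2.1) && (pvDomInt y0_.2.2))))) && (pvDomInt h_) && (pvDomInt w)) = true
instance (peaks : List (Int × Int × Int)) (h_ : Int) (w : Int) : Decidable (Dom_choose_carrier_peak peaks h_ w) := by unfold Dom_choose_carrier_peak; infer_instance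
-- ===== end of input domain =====

-- B replaces A's two tiered narrowing filters and fallback by one max over all peaks
-- keyed lexicographically by (rank, amplitude), rank = 2*(right half) + (near center row): simpler.

-- Shared primitive: Python's `int(0.12 * h)` — 0.12 is the IEEE double 1080863910568919/2^53;
-- the product with h is rounded to 53 significant bits (round half to even) and truncated
-- toward zero.  Exact for |h| ≤ 2^31 (the stated domain); both Pythons compute this expression.
def pyMul012Trunc (h : Int) : Int :=
  let s : Int := if h < 0 then -1 else 1
  let p : Nat := 1080863910568919 * h.natAbs
  let k : Nat := p.log2 + 1
  let p2 : Nat :=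
    if k ≤ 53 then p
    else
      let sh := k - 53
      let q := p / 2 ^ sh
      let r := p % 2 ^ sh
      let half := 2 ^ (sh - 1)
      let q2 := if half < r ∨ (r = half ∧ q % 2 = 1) then q + 1 else q
      q2 * 2 ^ sh
  s * ((p2 : Int) / 2 ^ 53)

-- ===== PORT A =====
def choose_carrier_peak (peaks : List (Int × Int × Int)) (h_ : Int) (w : Int) : Int × Int :=
  let cy := PySem.Int.floordiv h_ 2
  let cx := PySem.Int.floordiv w 2
  let candidates := peaks
  let candidates1 :=
    let c2 := candidates.filter (fun p => decide (cx < p.1))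
    if 0 < c2.length then c2 else candidates
  let candidates2 :=
    let max_dy := pyMul012Trunc h_
    let c2 := candidates1.filter (fun p => decide (|p.2.1 - cy| ≤ max_dy))
    if 0 < c2.length then c2 else candidates1
  let candidates3 := if candidates2.length = 0 then peaks else candidates2
  match PySem.List.max? candidates3 (fun t => t.2.2) with
  | some carrier => (carrier.1, carrier.2.1)
  | none => (0, 0)  -- unreachable under Pre_ (peaks ≠ []); Python raises ValueError

-- ===== PORT B =====
def choose_carrier_peak_alt (peaks : List (Int × Int × Int)) (h_ : Int) (w : Int) : Int × Int :=
  let cy := PySem.Int.floordiv h_ 2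
  let cx := PySem.Int.floordiv w 2
  let max_dy := pyMul012Trunc h_
  let rank : Int × Int × Int → Int := fun p =>
    2 * (if cx < p.1 then (1 : Int) else 0) + (if |p.2.1 - cy| ≤ max_dy then (1 : Int) else 0)
  match PySem.List.max2? peaks rank (fun p => p.2.2) with
  | some best => (best.1, best.2.1)
  | none => (0, 0)  -- unreachable under Pre_ (peaks ≠ []); Python raises ValueError

-- ===== PRECONDITION & SPEC =====
-- Pre_ excludes only the empty peaks list, on which Python's max raises ValueError.
def Pre_choose_carrier_peak (peaks : List (Int × Int × Int)) (h_ : Int) (w : Int) : Prop := peaks ≠ []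
instance (peaks : List (Int × Int × Int)) (h_ : Int) (w : Int) : Decidable (Pre_choose_carrier_peak peaks h_ w) := by unfold Pre_choose_carrier_peak; infer_instance

def pvWitness_choose_carrier_peak : (List (Int × Int × Int)) × Int × Int := ([(3, 1, 7), (0, 2, 9)], 4, 4)

def Spec_choose_carrier_peak (peaks : List (Int × Int × Int)) (h_ : Int) (w : Int) (out : Int × Int) : Prop := out = choose_carrier_peak_alt peaks h_ w
instance (peaks : List (Int × Int × Int)) (h_ : Int) (w : Int) (out : Int × Int) : Decidable (Spec_choose_carrier_peak peaks h_ w out) := by unfold Spec_choose_carrier_peak; infer_instance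

-- ===== CLAIM (what is proved, stated in full; the proofs are below) =====
def Claim_equal_choose_carrier_peak : Prop := ∀ (peaks : List (Int × Int × Int)) (h_ : Int) (w : Int), Dom_choose_carrier_peak peaks h_ w → Pre_choose_carrier_peak peaks h_ w → Spec_choose_carrier_peak peaks h_ w (choose_carrier_peak peaks h_ w)

-- ===== LEMMAS AND PROOFS =====

-- The fold step of PySem.List.max2? (lexicographic two-part Int key, first maximum kept).
def pvStep2 {α : Type} (k1 k2 : α → Int) (acc : Option α) (x : α) : Option α :=
  match acc with
  | none => some x
  | some m => if (decide (k1 m < k1 x) || !decide (k1 x < k1 m) && decide (k2 m < k2 x)) = true then some x else some m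

-- The fold step of PySem.List.max? (single key, first maximum kept).
def pvStepF {α : Type} (k2 : α → Int) (acc : Option α) (x : α) : Option α :=
  match acc with
  | none => some x
  | some m => if k2 m < k2 x then some x else some m

def pvInv {α : Type} (k1 : α → Int) (R : Int) (a b : Option α) : Prop :=
  (a = none ∧ b = none) ∨ (∃ m, a = some m ∧ k1 m < R ∧ b = none) ∨
    (∃ m, a = some m ∧ k1 m = R ∧ b = some m)

lemma pvInv_fold {α : Type} (k1 k2 : α → Int) (R : Int) :
    ∀ (l : List α) (a b : Option α), (∀ x ∈ l, k1 x ≤ R) → pvInv k1 R a b →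
      pvInv k1 R (l.foldl (pvStep2 k1 k2) a)
        ((l.filter (fun x => decide (k1 x = R))).foldl (pvStepF k2) b) := by
  intro l
  induction l with
  | nil => intro a b _ h; simpa using h
  | cons x t ih =>
    intro a b hle hI
    have hxle : k1 x ≤ R := hle x (by simp)
    have htle : ∀ y ∈ t, k1 y ≤ R := fun y hy => hle y (by simp [hy])
    by_cases hx : k1 x = R
    · simp only [List.filter_cons, hx, decide_true, if_true, List.foldl_cons]
      apply ih _ _ htle
      rcases hI with ⟨ha, hb⟩ | ⟨m, ha, hm, hb⟩ | ⟨m, ha, hm, hb⟩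
      · subst ha; subst hb
        exact Or.inr (Or.inr ⟨x, rfl, hx, rfl⟩)
      · subst ha; subst hb
        have h1 : k1 m < k1 x := by omega
        simp only [pvStep2, pvStepF, h1, decide_true, Bool.true_or, if_true]
        exact Or.inr (Or.inr ⟨x, rfl, hx, rfl⟩)
      · subst ha; subst hb
        have h1 : ¬ (k1 m < k1 x) := by omega
        have h2 : ¬ (k1 x < k1 m) := by omega
        simp only [pvStep2, pvStepF, h1, h2, decide_false, Bool.false_or, Bool.not_false,
          Bool.true_and]
        by_cases h3 : k2 m < k2 x
        · simp only [h3, decide_true, if_true]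
          exact Or.inr (Or.inr ⟨x, rfl, hx, rfl⟩)
        · simp only [h3, decide_false, if_false]
          exact Or.inr (Or.inr ⟨m, rfl, hm, rfl⟩)
    · have hxlt : k1 x < R := by omega
      simp only [List.filter_cons, hx, decide_false, List.foldl_cons]
      apply ih _ _ htle
      rcases hI with ⟨ha, hb⟩ | ⟨m, ha, hm, hb⟩ | ⟨m, ha, hm, hb⟩
      · subst ha; subst hb
        exact Or.inr (Or.inl ⟨x, rfl, hxlt, rfl⟩)
      · subst ha; subst hb
        simp only [pvStep2]
        split_ifs with h
        · exact Or.inr (Or.inl ⟨x, rfl, hxlt, rfl⟩)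
        · exact Or.inr (Or.inl ⟨m, rfl, hm, rfl⟩)
      · subst ha; subst hb
        have h1 : ¬ (k1 m < k1 x) := by omega
        have h2 : k1 x < k1 m := by omega
        simp only [pvStep2, h1, h2, decide_false, decide_true, Bool.false_or, Bool.not_true,
          Bool.false_and]
        exact Or.inr (Or.inr ⟨m, rfl, hm, rfl⟩)

lemma pvMaxF_ne_none {α : Type} (k2 : α → Int) (l : List α) (hl : l ≠ []) :
    l.foldl (pvStepF k2) none ≠ none := by
  have : l.foldl (pvStepF k2) (none : Option α) = PySem.List.max? l k2 := rfl
  rw [this]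
  intro h
  exact hl ((PySem.List.max?_eq_none_iff _ _).mp h)

lemma pvMax2_eq_max_filter {α : Type} (k1 k2 : α → Int) (R : Int) (l : List α)
    (hle : ∀ x ∈ l, k1 x ≤ R) (hex : ∃ x ∈ l, k1 x = R) :
    PySem.List.max2? l k1 k2 = PySem.List.max? (l.filter (fun x => decide (k1 x = R))) k2 := by
  have h2 : PySem.List.max2? l k1 k2 = l.foldl (pvStep2 k1 k2) none := rfl
  have hF : PySem.List.max? (l.filter (fun x => decide (k1 x = R))) k2
      = (l.filter (fun x => decide (k1 x = R))).foldl (pvStepF k2) none := rfl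
  have hne : l.filter (fun x => decide (k1 x = R)) ≠ [] := by
    rcases hex with ⟨x, hxl, hx⟩
    intro hnil
    have : x ∈ l.filter (fun x => decide (k1 x = R)) := by
      simp [List.mem_filter, hxl, hx]
    simp [hnil] at this
  have hsome := pvMaxF_ne_none k2 _ hne
  have := pvInv_fold k1 k2 R l none none hle (Or.inl ⟨rfl, rfl⟩)
  rcases this with ⟨_, hb⟩ | ⟨m, ha, _, hb⟩ | ⟨m, ha, hm, hb⟩
  · exact absurd hb hsome
  · exact absurd hb hsome
  · rw [h2, hF, ha, hb]

def pvRank (cx cy md : Int) (p : Int × Int × Int) : Int :=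
  2 * (if cx < p.1 then (1 : Int) else 0) + (if |p.2.1 - cy| ≤ md then (1 : Int) else 0)

lemma pvRank_le3 (cx cy md : Int) (p : Int × Int × Int) : pvRank cx cy md p ≤ 3 := by
  unfold pvRank; split_ifs <;> omega

lemma pvOpt (cx cy md : Int) (peaks : List (Int × Int × Int)) :
    PySem.List.max?
      (let candidates1 :=
        let c2 := peaks.filter (fun p => decide (cx < p.1))
        if 0 < c2.length then c2 else peaks
      let candidates2 :=
        let c2 := candidates1.filter (fun p => decide (|p.2.1 - cy| ≤ md))
        if 0 < c2.length then c2 else candidates1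
      if candidates2.length = 0 then peaks else candidates2) (fun t => t.2.2)
    = PySem.List.max2? peaks (pvRank cx cy md) (fun p => p.2.2) := by
  set Pb : Int × Int × Int → Bool := fun p => decide (cx < p.1) with hPb
  set Nb : Int × Int × Int → Bool := fun p => decide (|p.2.1 - cy| ≤ md) with hNb
  by_cases hP : 0 < (peaks.filter Pb).length
  · simp only [hP, if_true]
    by_cases hN : 0 < ((peaks.filter Pb).filter Nb).length
    · -- R = 3: some peak is in the right half AND near the center row
      have hne : ((peaks.filter Pb).filter Nb).length ≠ 0 := by omega
      simp only [hN, if_true, hne, if_false]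
      rw [pvMax2_eq_max_filter (pvRank cx cy md) (fun p => p.2.2) 3 peaks
        (fun x _ => pvRank_le3 cx cy md x) ?hex3]
      · congr 1
        rw [List.filter_filter]
        apply List.filter_congr
        intro a _
        simp only [hPb, hNb, pvRank]
        by_cases h1 : cx < a.1 <;> by_cases h2 : |a.2.1 - cy| ≤ md <;>
          simp [h1, h2]
      · rcases List.exists_mem_of_length_pos hN with ⟨x, hx⟩
        rw [List.mem_filter] at hx
        rcases hx with ⟨hx1, hx2⟩
        rw [List.mem_filter] at hx1
        rcases hx1 with ⟨hxp, hx3⟩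
        refine ⟨x, hxp, ?_⟩
        simp only [hPb, hNb, decide_eq_true_eq] at hx2 hx3
        simp [pvRank, hx2, hx3]
    · -- R = 2: right-half peaks exist, none of them near the center row
      have hnil : (peaks.filter Pb).filter Nb = [] := by
        have := Nat.eq_zero_of_not_pos hN
        exact List.eq_nil_of_length_eq_zero this
      have hNall : ∀ a ∈ peaks.filter Pb, ¬ (Nb a = true) :=
        List.filter_eq_nil_iff.mp hnil
      have hne : (peaks.filter Pb).length ≠ 0 := by omega
      simp only [hN, if_false, hne, if_false]
      rw [pvMax2_eq_max_filter (pvRank cx cy md) (fun p => p.2.2) 2 peaks ?hle2 ?hex2]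
      · congr 1
        apply List.filter_congr
        intro a ha
        by_cases h1 : Pb a = true
        · have h2 := hNall a (List.mem_filter.mpr ⟨ha, h1⟩)
          simp only [hPb, hNb, decide_eq_true_eq] at h1 h2
          simp [pvRank, h1, h2, hPb]
        · simp only [hPb, decide_eq_true_eq] at h1
          have : ¬ (|a.2.1 - cy| ≤ md) ∨ (|a.2.1 - cy| ≤ md) := by tauto
          simp only [hPb]
          rcases this with h2 | h2 <;> simp [pvRank, h1, h2]
      · intro x hx
        by_cases h1 : Pb x = true
        · have h2 := hNall x (List.mem_filter.mpr ⟨hx, h1⟩)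
          simp only [hPb, hNb, decide_eq_true_eq] at h1 h2
          simp [pvRank, h1, h2]
        · simp only [hPb, decide_eq_true_eq] at h1
          unfold pvRank
          split_ifs <;> omega
      · rcases List.exists_mem_of_length_pos hP with ⟨x, hx⟩
        rw [List.mem_filter] at hx
        rcases hx with ⟨hxp, hx1⟩
        have h2 := hNall x (List.mem_filter.mpr ⟨hxp, hx1⟩)
        simp only [hPb, hNb, decide_eq_true_eq] at hx1 h2
        exact ⟨x, hxp, by simp [pvRank, hx1, h2]⟩
  · -- no right-half peak
    have hPnil : peaks.filter Pb = [] := by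
      have := Nat.eq_zero_of_not_pos hP
      exact List.eq_nil_of_length_eq_zero this
    have hPall : ∀ a ∈ peaks, ¬ (Pb a = true) := List.filter_eq_nil_iff.mp hPnil
    simp only [hP, if_false]
    by_cases hN : 0 < (peaks.filter Nb).length
    · -- R = 1: some peak near the center row
      have hne : (peaks.filter Nb).length ≠ 0 := by omega
      simp only [hN, if_true, hne, if_false]
      rw [pvMax2_eq_max_filter (pvRank cx cy md) (fun p => p.2.2) 1 peaks ?hle1 ?hex1]
      · congr 1
        apply List.filter_congr
        intro a ha
        have h1 := hPall a ha
        simp only [hPb, decide_eq_true_eq] at h1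
        by_cases h2 : |a.2.1 - cy| ≤ md <;> simp [pvRank, hNb, h1, h2]
      · intro x hx
        have h1 := hPall x hx
        simp only [hPb, decide_eq_true_eq] at h1
        unfold pvRank
        split_ifs <;> omega
      · rcases List.exists_mem_of_length_pos hN with ⟨x, hx⟩
        rw [List.mem_filter] at hx
        rcases hx with ⟨hxp, hx1⟩
        have h1 := hPall x hxp
        simp only [hPb, hNb, decide_eq_true_eq] at h1 hx1
        exact ⟨x, hxp, by simp [pvRank, h1, hx1]⟩
    · -- R = 0: no right-half peak, none near the center row
      have hNnil : peaks.filter Nb = [] := by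
        have := Nat.eq_zero_of_not_pos hN
        exact List.eq_nil_of_length_eq_zero this
      have hNall : ∀ a ∈ peaks, ¬ (Nb a = true) := List.filter_eq_nil_iff.mp hNnil
      simp only [hN, if_false, ite_self]
      rcases List.eq_nil_or_concat' peaks with hnil | ⟨_, _, rfl⟩
      · subst hnil; rfl
      · rw [pvMax2_eq_max_filter (pvRank cx cy md) (fun p => p.2.2) 0 _ ?hle0 ?hex0]
        · congr 1
          symm
          rw [List.filter_eq_self]
          intro a ha
          have h1 := hPall a ha
          have h2 := hNall a ha
          simp only [hPb, hNb, decide_eq_true_eq] at h1 h2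
          simp [pvRank, h1, h2]
        · intro x hx
          have h1 := hPall x hx
          have h2 := hNall x hx
          simp only [hPb, hNb, decide_eq_true_eq] at h1 h2
          simp [pvRank, h1, h2]
        · refine ⟨_, List.mem_concat_self, ?_⟩
          have h1 := hPall _ List.mem_concat_self
          have h2 := hNall _ List.mem_concat_self
          simp only [hPb, hNb, decide_eq_true_eq] at h1 h2
          simp [pvRank, h1, h2]

-- ===== VERDICT (by name: the statement is the Claim_ definition above) =====
theorem choose_carrier_peak_spec : Claim_equal_choose_carrier_peak := by
  intro peaks h_ w _hdom _hpre
  unfold Spec_choose_carrier_peak choose_carrier_peak choose_carrier_peak_alt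
  exact congrArg
    (fun o : Option (Int × Int × Int) =>
      match o with
      | some c => (c.1, c.2.1)
      | none => ((0 : Int), (0 : Int)))
    (pvOpt (PySem.Int.floordiv w 2) (PySem.Int.floordiv h_ 2) (pyMul012Trunc h_) peaks)
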